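-- pv_equiv track=rewrite | github.com/cedarwud/png2svg | src/png2svg/extractor_text.py | _text_char_stats
-- ===== SOURCE A (Python) =====
-- def _text_char_stats(value: str) -> dict[str, float]:
--     total = len(value)
--     if total == 0:
--         return {"total": 0, "alnum": 0, "alpha": 0, "digit": 0, "ascii": 0}
--     alnum = sum(1 for ch in value if ch.isalnum())
--     alpha = sum(1 for ch in value if ch.isalpha())
--     digit = sum(1 for ch in value if ch.isdigit())
--     ascii_count = sum(1 for ch in value if ord(ch) < 128)
--     return {
--         "total": total,
--         "alnum": alnum,
--         "alpha": alpha,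
--         "digit": digit,
--         "ascii": ascii_count,
--     }
-- ===== SOURCE B (Python) =====
-- def _text_char_stats(value: str) -> dict[str, float]:
--     alnum = alpha = digit = ascii_count = 0
--     for ch in value:
--         if ch.isalnum():
--             alnum += 1
--         if ch.isalpha():
--             alpha += 1
--         if ch.isdigit():
--             digit += 1
--         if ord(ch) < 128:
--             ascii_count += 1
--     return {
--         "total": len(value),
--         "alnum": alnum,
--         "alpha": alpha,
--         "digit": digit,
--         "ascii": ascii_count,
--     }
-- ===== Notes on version B (the rewrite author's own statement) =====
-- stated objective: alternative
-- what changed: Replaced A's four separate comprehension passes (plus an empty-string special case) with one loop over the string maintaining four running counters; the empty case falls out naturally.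
import Mathlib
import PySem

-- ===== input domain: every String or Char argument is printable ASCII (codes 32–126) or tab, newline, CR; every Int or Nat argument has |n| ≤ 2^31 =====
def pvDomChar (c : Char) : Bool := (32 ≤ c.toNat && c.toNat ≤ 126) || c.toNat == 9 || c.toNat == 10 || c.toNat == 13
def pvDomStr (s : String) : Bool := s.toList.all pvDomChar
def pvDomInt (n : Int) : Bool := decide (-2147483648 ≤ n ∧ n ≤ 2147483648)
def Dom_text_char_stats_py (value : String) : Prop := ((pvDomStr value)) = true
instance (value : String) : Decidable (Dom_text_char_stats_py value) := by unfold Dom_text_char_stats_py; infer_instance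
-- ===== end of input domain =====

-- B fuses A's four counting passes (and its empty-string special case) into one loop with four counters.

-- ===== PORT A =====
-- sum(1 for ch in value if pred(ch)) as a fold over the characters
def pvSumIf (p : Char → Bool) (value : List Char) : Int :=
  value.foldl (fun s c => if p c then s + 1 else s) 0

def text_char_stats_py (value : String) : List (String × Int) :=
  let total : Int := PySem.Str.len value
  if total = 0 then
    [("total", 0), ("alnum", 0), ("alpha", 0), ("digit", 0), ("ascii", 0)]
  else
    let alnum := pvSumIf PySem.Chars.isalnum value.toList
    let alpha := pvSumIf PySem.Chars.isalpha value.toList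
    let digit := pvSumIf PySem.Chars.isdigit value.toList
    let ascii_count := pvSumIf (fun c => c.toNat < 128) value.toList
    [("total", total), ("alnum", alnum), ("alpha", alpha), ("digit", digit), ("ascii", ascii_count)]

-- ===== PORT B =====
-- one pass, four running counters
def pvStep (s : Int × Int × Int × Int) (c : Char) : Int × Int × Int × Int :=
  let s := if PySem.Chars.isalnum c then (s.1 + 1, s.2.1, s.2.2.1, s.2.2.2) else s
  let s := if PySem.Chars.isalpha c then (s.1, s.2.1 + 1, s.2.2.1, s.2.2.2) else s
  let s := if PySem.Chars.isdigit c then (s.1, s.2.1, s.2.2.1 + 1, s.2.2.2) else s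
  if c.toNat < 128 then (s.1, s.2.1, s.2.2.1, s.2.2.2 + 1) else s

def text_char_stats_py_alt (value : String) : List (String × Int) :=
  let r := value.toList.foldl pvStep (0, 0, 0, 0)
  [("total", (PySem.Str.len value : Int)), ("alnum", r.1), ("alpha", r.2.1),
   ("digit", r.2.2.1), ("ascii", r.2.2.2)]

-- ===== PRECONDITION & SPEC =====
def Spec_text_char_stats_py (value : String) (out : List (String × Int)) : Prop := out = text_char_stats_py_alt value
instance (value : String) (out : List (String × Int)) : Decidable (Spec_text_char_stats_py value out) := by unfold Spec_text_char_stats_py; infer_instance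

-- ===== CLAIM (what is proved, stated in full; the proofs are below) =====
def Claim_equal_text_char_stats_py : Prop := ∀ (value : String), Dom_text_char_stats_py value → Spec_text_char_stats_py value (text_char_stats_py value)

-- ===== LEMMAS AND PROOFS =====

lemma pvSumIf_shift (p : Char → Bool) (l : List Char) (s : Int) :
    l.foldl (fun a c => if p c then a + 1 else a) s = s + pvSumIf p l := by
  induction l generalizing s with
  | nil => simp [pvSumIf]
  | cons c t ih =>
    simp only [pvSumIf, List.foldl_cons]
    rw [ih, ih]
    by_cases h : p c <;> simp [h] <;> ring

lemma pvSumIf_cons (p : Char → Bool) (c : Char) (t : List Char) :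
    pvSumIf p (c :: t) = (if p c then 1 else 0) + pvSumIf p t := by
  conv_lhs => rw [pvSumIf]
  rw [List.foldl_cons, pvSumIf_shift]
  split_ifs <;> ring

lemma pvFold4_eq (l : List Char) (a b c d : Int) :
    l.foldl pvStep (a, b, c, d) =
      (a + pvSumIf PySem.Chars.isalnum l, b + pvSumIf PySem.Chars.isalpha l,
       c + pvSumIf PySem.Chars.isdigit l, d + pvSumIf (fun ch => ch.toNat < 128) l) := by
  induction l generalizing a b c d with
  | nil => simp [pvSumIf]
  | cons ch t ih =>
    rw [List.foldl_cons]
    by_cases h1 : PySem.Chars.isalnum ch <;>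
    by_cases h2 : PySem.Chars.isalpha ch <;>
    by_cases h3 : PySem.Chars.isdigit ch <;>
    by_cases h4 : ch.toNat < 128 <;>
      simp only [pvStep, h1, h2, h3, h4, if_true, if_false, ih, pvSumIf_cons,
        if_pos, if_neg, not_false_iff, decide_true, decide_false, ite_true, ite_false] <;>
      simp [h1, h2, h3, h4, Prod.ext_iff] <;> omega

-- ===== VERDICT (by name: the statement is the Claim_ definition above) =====
theorem text_char_stats_py_spec : Claim_equal_text_char_stats_py := by
  intro value _
  unfold Spec_text_char_stats_py text_char_stats_py text_char_stats_py_alt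
  simp only [pvFold4_eq, zero_add]
  by_cases h : (PySem.Str.len value : Int) = 0
  · have hl : value.toList = [] := by
      simp [PySem.Str.len, PySem.Chars.len] at h
      simpa [List.length_eq_zero_iff] using h
    simp [h, hl, pvSumIf]
  · have hne : value ≠ "" := by
      intro he
      exact h (by simp [he, PySem.Str.len, PySem.Chars.len])
    simp [h, hne, PySem.Str.len, PySem.Chars.len]
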